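-- pv_equiv track=rewrite | github.com/Kevincklhhh/FoodMemory | epic-kitchen-visor/extract_food_from_visor.py | is_food_item
-- ===== SOURCE A (Python) =====
-- from typing import Dict, List, Set, Tuple
--
-- def is_food_item(object_name: str, food_nouns: Set[str]) -> bool:
--     """
--     Check if an object name matches a food noun.
--     Handles variations and compound names.
--     """
--     object_lower = object_name.lower()
--
--     # Direct match
--     if object_lower in food_nouns:
--         return True
--
--     # Check if any food noun is in the object name
--     for food in food_nouns:
--         if food in object_lower:
--             return True
--
--     # Handle colon-separated names (e.g., "bean:green")
--     if ':' in object_lower: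
--         parts = object_lower.split(':')
--         for part in parts:
--             if part in food_nouns:
--                 return True
--
--     return False
-- ===== SOURCE B (Python) =====
-- def is_food_item(object_name: str, food_nouns) -> bool:
--     """
--     Check if an object name matches a food noun: collect every substring of
--     the lowered name whose length is the length of some food noun, then
--     test the nouns against that set in one pass.
--     """
--     object_lower = object_name.lower()
--     n = len(object_lower)
--     lens = {len(f) for f in food_nouns}
--     hits = {object_lower[i:i + k] for k in lens for i in range(n - k + 1)}
--     return any(f in hits for f in food_nouns)
-- ===== Notes on version B (the rewrite author's own statement) =====
-- stated objective: alternative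
-- what changed: B builds, once, the set of all substrings of the lowered name whose length is the length of some food noun and tests the nouns against that set in a single pass, instead of A's three passes (direct set lookup, per-noun substring scan, colon-split re-lookup).
import Mathlib
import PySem

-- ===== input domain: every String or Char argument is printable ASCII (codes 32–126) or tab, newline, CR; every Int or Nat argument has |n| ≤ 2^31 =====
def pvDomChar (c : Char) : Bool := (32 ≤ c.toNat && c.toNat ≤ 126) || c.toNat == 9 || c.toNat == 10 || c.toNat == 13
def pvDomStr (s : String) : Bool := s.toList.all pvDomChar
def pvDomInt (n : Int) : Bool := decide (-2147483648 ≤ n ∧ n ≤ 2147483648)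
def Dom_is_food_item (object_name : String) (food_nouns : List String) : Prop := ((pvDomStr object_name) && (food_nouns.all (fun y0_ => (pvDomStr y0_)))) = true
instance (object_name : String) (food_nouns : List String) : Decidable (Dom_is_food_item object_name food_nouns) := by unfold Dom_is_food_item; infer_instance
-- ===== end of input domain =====

-- B builds the set of substrings of the lowered name whose length matches some
-- food noun and tests the nouns against it in one pass, instead of A's three
-- passes (direct lookup, per-noun substring scan, colon-split re-lookup).

-- ===== PORT A =====
def is_food_item (object_name : String) (food_nouns : List String) : Bool :=
  let object_lower := PySem.Str.lower object_name
  -- Direct match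
  if food_nouns.contains object_lower then true
  -- Check if any food noun is in the object name (for-loop with early return)
  else if food_nouns.any (fun food => PySem.Str.isIn food object_lower) then true
  -- Handle colon-separated names
  else if PySem.Str.isIn ":" object_lower then
    ((PySem.Str.split? object_lower ":").getD []).any (fun part => food_nouns.contains part)
  else false

-- ===== PORT B =====
def is_food_item_alt (object_name : String) (food_nouns : List String) : Bool :=
  let object_lower := PySem.Str.lower object_name
  let n : Int := PySem.Str.len object_lower
  let lens : PySem.Set Int := PySem.Set.ofList (food_nouns.map PySem.Str.len)
  let hits : PySem.Set String := PySem.Set.ofList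
    (lens.flatMap (fun k =>
      (PySem.List.pyRange 0 (n - k + 1) 1).map (fun i =>
        PySem.Str.slice object_lower (some i) (some (i + k)))))
  food_nouns.any (fun f => hits.contains f)

-- ===== PRECONDITION & SPEC =====
def Spec_is_food_item (object_name : String) (food_nouns : List String) (out : Bool) : Prop := out = is_food_item_alt object_name food_nouns
instance (object_name : String) (food_nouns : List String) (out : Bool) : Decidable (Spec_is_food_item object_name food_nouns out) := by unfold Spec_is_food_item; infer_instance

-- ===== CLAIM (what is proved, stated in full; the proofs are below) =====
def Claim_equal_is_food_item : Prop := ∀ (object_name : String) (food_nouns : List String), Dom_is_food_item object_name food_nouns → Spec_is_food_item object_name food_nouns (is_food_item object_name food_nouns)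

-- ===== LEMMAS AND PROOFS =====

-- every piece produced by Chars.splitOn is an infix of the input
theorem mem_splitOn_go_infix (sep : List Char) (fuel : Nat) (l cur : List Char)
    (acc : List (List Char)) (x : List Char)
    (hx : x ∈ PySem.Chars.splitOn.go sep fuel l cur acc) :
    x ∈ acc ∨ (∃ t, x = cur.reverse ++ t ∧ t <+: l) ∨ x <:+: l := by
  induction fuel generalizing l cur acc with
  | zero =>
    simp only [PySem.Chars.splitOn.go, List.mem_reverse, List.mem_cons] at hx
    rcases hx with h | h
    · exact Or.inr (Or.inl ⟨l, h, List.prefix_rfl⟩)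
    · exact Or.inl h
  | succ fuel ih =>
    match l with
    | [] =>
      simp only [PySem.Chars.splitOn.go, List.mem_reverse, List.mem_cons] at hx
      rcases hx with h | h
      · exact Or.inr (Or.inl ⟨[], by simp [h], List.nil_prefix⟩)
      · exact Or.inl h
    | c :: rest =>
      rw [PySem.Chars.splitOn.go] at hx
      by_cases hp : sep.isPrefixOf (c :: rest) = true
      · simp only [hp, if_true] at hx
        rcases ih _ _ _ hx with h | ⟨t, ht, htp⟩ | h
        · rcases List.mem_cons.mp h with h | h
          · exact Or.inr (Or.inl ⟨[], by simp [h], List.nil_prefix⟩)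
          · exact Or.inl h
        · refine Or.inr (Or.inr ?_)
          have : t <:+: (c :: rest) :=
            htp.isInfix.trans (List.drop_suffix sep.length (c :: rest)).isInfix
          simpa [ht] using this
        · exact Or.inr (Or.inr (h.trans (List.drop_suffix sep.length (c :: rest)).isInfix))
      · simp only [hp] at hx
        rcases ih _ _ _ hx with h | ⟨t, ht, htp⟩ | h
        · exact Or.inl h
        · refine Or.inr (Or.inl ⟨c :: t, ?_, ?_⟩)
          · simpa using ht
          · simpa using htp
        · exact Or.inr (Or.inr (h.trans (List.suffix_cons c rest).isInfix))

theorem mem_splitOn_infix (s sep x : List Char) (hx : x ∈ PySem.Chars.splitOn s sep) :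
    x <:+: s := by
  rcases mem_splitOn_go_infix sep (s.length + 1) s [] [] x hx with h | ⟨t, ht, htp⟩ | h
  · simp at h
  · subst ht; simpa using htp.isInfix
  · exact h

-- A equals "some food noun is an infix of the lowered name"
theorem isA_eq_any (object_name : String) (food_nouns : List String) :
    is_food_item object_name food_nouns
      = food_nouns.any (fun food => PySem.Str.isIn food (PySem.Str.lower object_name)) := by
  unfold is_food_item
  set ol := PySem.Str.lower object_name with hol
  by_cases hany : food_nouns.any (fun food => PySem.Str.isIn food ol) = true
  · -- any branch (or direct-match branch) returns true
    simp only [hany]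
    by_cases hc : food_nouns.contains ol = true <;> simp
  · -- no food noun is an infix: direct match and colon parts are impossible too
    have hno : ∀ f ∈ food_nouns, ¬ (f.toList <:+: ol.toList) := by
      intro f hf hinf
      exact hany (List.any_eq_true.mpr ⟨f, hf, (PySem.Str.isIn_iff_infix f ol).mpr hinf⟩)
    have hc : food_nouns.contains ol = false := by
      by_contra h
      have : ol ∈ food_nouns := by
        simpa using List.contains_iff_mem.mp (by simpa using h)
      exact hno ol this List.infix_rfl
    simp only [hc, hany, Bool.false_eq_true, if_false]
    by_cases hco : PySem.Str.isIn ":" ol = true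
    · simp only [hco, if_true]
      rw [List.any_eq_false]
      intro part hpart
      have hinf : part.toList <:+: ol.toList := by
        unfold PySem.Str.split? PySem.Chars.split? at hpart
        simp at hpart
        rcases hpart with ⟨p, hp, rfl⟩
        have := mem_splitOn_infix ol.toList [':'] p hp
        simpa using this
      intro hcontains
      have hmem : part ∈ food_nouns := by
        simpa using List.contains_iff_mem.mp (by simpa using hcontains)
      exact hno part hmem hinf
    · have hco' : PySem.Chars.isIn ":".toList ol.toList ≠ true := by
        simpa [PySem.Str.isIn] using hco
      simp at hco'
      simp [hco']

-- for a food noun f, membership in B's substring set is exactly "infix of the lowered name"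
theorem mem_hits_iff (ol : String) (food_nouns : List String) (f : String)
    (hf : f ∈ food_nouns) :
    (f ∈ ((PySem.Set.ofList (food_nouns.map PySem.Str.len) : PySem.Set Int).flatMap (fun k =>
      (PySem.List.pyRange 0 (PySem.Str.len ol - k + 1) 1).map (fun i =>
        PySem.Str.slice ol (some i) (some (i + k))))))
      ↔ f.toList <:+: ol.toList := by
  have hlenol : PySem.Str.len ol = (ol.toList.length : Int) := by
    simp [pysem]
  constructor
  · intro hmem
    simp only [List.mem_flatMap, List.mem_map] at hmem
    obtain ⟨k, hk, i, hi, rfl⟩ := hmem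
    have hk0 : 0 ≤ k := by
      have : k ∈ food_nouns.map PySem.Str.len := by
        simpa using (PySem.Set.mem_ofList (food_nouns.map PySem.Str.len) k).mp hk
      obtain ⟨g, _, rfl⟩ := List.mem_map.mp this
      simp [pysem]
    rw [PySem.List.mem_pyRange_one] at hi
    rw [PySem.Str.toList_slice]
    show PySem.List.slice ol.toList (some i) (some (i + k)) <:+: ol.toList
    rw [PySem.List.slice_toNat ol.toList hi.1 (by omega)]
    exact (List.take_prefix _ _).isInfix.trans (List.drop_suffix _ _).isInfix
  · intro hinf
    obtain ⟨sp, tp, hst⟩ := hinf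
    have hlen : sp.length + f.toList.length + tp.length = ol.toList.length := by
      have := congrArg List.length hst
      simp only [List.length_append] at this
      omega
    have hlenf : PySem.Str.len f = (f.toList.length : Int) := by
      simp [pysem]
    refine List.mem_flatMap.mpr ⟨PySem.Str.len f, ?_,
      List.mem_map.mpr ⟨(sp.length : Int), ?_, ?_⟩⟩
    · exact (PySem.Set.mem_ofList _ _).mpr (List.mem_map.mpr ⟨f, hf, rfl⟩)
    · rw [PySem.List.mem_pyRange_one, hlenol, hlenf]
      constructor
      · exact_mod_cast Nat.zero_le _
      · omega
    · refine String.toList_inj.mp ?_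
      rw [PySem.Str.toList_slice]
      show PySem.List.slice ol.toList _ _ = f.toList
      rw [hlenf, PySem.List.slice_toNat ol.toList (by exact_mod_cast Nat.zero_le _)
        (by positivity)]
      have h1 : ((sp.length : Int) + (f.toList.length : Int)).toNat
          = sp.length + f.toList.length := by omega
      have h2 : ((sp.length : Int)).toNat = sp.length := by omega
      rw [h1, h2, ← hst]
      simp

theorem isB_eq_any (object_name : String) (food_nouns : List String) :
    is_food_item_alt object_name food_nouns
      = food_nouns.any (fun food => PySem.Str.isIn food (PySem.Str.lower object_name)) := by
  unfold is_food_item_alt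
  refine Bool.eq_iff_iff.mpr ?_
  simp only [List.any_eq_true, PySem.Set.contains_iff, PySem.Set.mem_ofList,
    PySem.Str.isIn_iff_infix]
  constructor
  · rintro ⟨f, hf, h⟩
    exact ⟨f, hf, (mem_hits_iff _ food_nouns f hf).mp h⟩
  · rintro ⟨f, hf, h⟩
    exact ⟨f, hf, (mem_hits_iff _ food_nouns f hf).mpr h⟩

-- ===== VERDICT (by name: the statement is the Claim_ definition above) =====
theorem is_food_item_spec : Claim_equal_is_food_item := by
  intro object_name food_nouns _
  unfold Spec_is_food_item
  rw [isA_eq_any, isB_eq_any]
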